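-- pv_equiv track=rewrite | github.com/bigjunnn/k-puzzle | CS3243_P1_22_2.py | apply_action_to_state
-- ===== SOURCE A (Python) =====
-- def apply_action_to_state(prev_state, action, col, row):
--     if action is None:
--         return prev_state, col, row
--     else:
--         new_arr = [x[:] for x in prev_state]
--         new_col = col
--         new_row = row
--
--         # Defines the possible movements and returns an array representing the movement
--         if action == "RIGHT":
--             new_arr[row][col] = new_arr[row][col + 1]
--             new_arr[row][col + 1] = 0
--             new_col = col + 1
--
--         elif action == "LEFT":
--             new_arr[row][col] = new_arr[row][col - 1]
--             new_arr[row][col - 1] = 0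
--             new_col = col - 1
--
--         elif action == "UP":
--             new_arr[row][col] = new_arr[row - 1][col]
--             new_arr[row - 1][col] = 0
--             new_row = row - 1
--
--         elif action == "DOWN":
--             new_arr[row][col] = new_arr[row + 1][col]
--             new_arr[row + 1][col] = 0
--             new_row = row + 1
--         return new_arr, new_col, new_row
-- ===== SOURCE B (Python) =====
-- MOVE_DELTAS = {"RIGHT": (0, 1), "LEFT": (0, -1), "UP": (-1, 0), "DOWN": (1, 0)}
--
-- def _with_set(lst, i, v):
--     out = list(lst)
--     out[i] = v
--     return out
--
-- def _with_cell(board, r, c, v):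
--     return _with_set(board, r, _with_set(board[r], c, v))
--
-- def apply_action_to_state(prev_state, action, col, row):
--     if action is None:
--         return prev_state, col, row
--     delta = MOVE_DELTAS.get(action)
--     if delta is None:
--         return [list(r) for r in prev_state], col, row
--     nr, nc = row + delta[0], col + delta[1]
--     moved = prev_state[nr][nc]
--     board = _with_cell(prev_state, row, col, moved)
--     board = _with_cell(board, nr, nc, 0)
--     return board, nc, nr
-- ===== Notes on version B (the rewrite author's own statement) =====
-- stated objective: alternative
-- what changed: Replaces A's deep-copy-the-whole-board-then-mutate-in-place branch chain with purely functional copy-on-write point updates: a delta table picks the move and two composed with_cell updates rebuild only the touched rows, never deep-copying the board on a recognised move.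
import Mathlib
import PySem

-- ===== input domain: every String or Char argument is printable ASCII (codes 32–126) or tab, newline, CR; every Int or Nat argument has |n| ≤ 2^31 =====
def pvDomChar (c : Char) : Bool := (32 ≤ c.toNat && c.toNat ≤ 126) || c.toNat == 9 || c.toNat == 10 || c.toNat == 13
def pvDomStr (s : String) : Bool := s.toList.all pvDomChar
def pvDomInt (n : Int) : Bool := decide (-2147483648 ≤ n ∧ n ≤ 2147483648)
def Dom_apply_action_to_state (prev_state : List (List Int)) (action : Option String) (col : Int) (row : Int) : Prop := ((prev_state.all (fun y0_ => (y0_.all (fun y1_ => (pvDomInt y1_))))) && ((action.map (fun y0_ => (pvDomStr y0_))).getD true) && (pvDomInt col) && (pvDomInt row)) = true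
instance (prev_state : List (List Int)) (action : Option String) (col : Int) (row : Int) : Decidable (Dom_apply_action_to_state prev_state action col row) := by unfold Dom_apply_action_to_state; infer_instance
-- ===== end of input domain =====

-- B replaces A's deep-copy-then-mutate branch chain by purely functional copy-on-write
-- point updates driven by a delta table (objective: alternative).
-- Return-value equivalence only: neither version mutates its arguments; A returns a board
-- of freshly copied rows while B's untouched rows alias the input (values are equal).

-- ===== PORT A =====
-- Literal port of A: branch chain; each branch does
--   new_arr[row][col] = new_arr[r'][c']; new_arr[r'][c'] = 0
-- with pyGetD/pySetD (total forms; Pre_ guarantees every index is in range).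
def apply_action_to_state (prev_state : List (List Int)) (action : Option String) (col : Int) (row : Int) : List (List Int) × Int × Int :=
  match action with
  | none => (prev_state, col, row)
  | some a =>
    let new_arr := prev_state.map (fun x => x)   -- [x[:] for x in prev_state]
    if a = "RIGHT" then
      -- new_arr[row][col] = new_arr[row][col + 1]
      let v := PySem.List.pyGetD (PySem.List.pyGetD new_arr row []) (col + 1) 0
      let new_arr := PySem.List.pySetD new_arr row (PySem.List.pySetD (PySem.List.pyGetD new_arr row []) col v)
      -- new_arr[row][col + 1] = 0
      let new_arr := PySem.List.pySetD new_arr row (PySem.List.pySetD (PySem.List.pyGetD new_arr row []) (col + 1) 0)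
      (new_arr, col + 1, row)
    else if a = "LEFT" then
      let v := PySem.List.pyGetD (PySem.List.pyGetD new_arr row []) (col - 1) 0
      let new_arr := PySem.List.pySetD new_arr row (PySem.List.pySetD (PySem.List.pyGetD new_arr row []) col v)
      let new_arr := PySem.List.pySetD new_arr row (PySem.List.pySetD (PySem.List.pyGetD new_arr row []) (col - 1) 0)
      (new_arr, col - 1, row)
    else if a = "UP" then
      let v := PySem.List.pyGetD (PySem.List.pyGetD new_arr (row - 1) []) col 0
      let new_arr := PySem.List.pySetD new_arr row (PySem.List.pySetD (PySem.List.pyGetD new_arr row []) col v)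
      let new_arr := PySem.List.pySetD new_arr (row - 1) (PySem.List.pySetD (PySem.List.pyGetD new_arr (row - 1) []) col 0)
      (new_arr, col, row - 1)
    else if a = "DOWN" then
      let v := PySem.List.pyGetD (PySem.List.pyGetD new_arr (row + 1) []) col 0
      let new_arr := PySem.List.pySetD new_arr row (PySem.List.pySetD (PySem.List.pyGetD new_arr row []) col v)
      let new_arr := PySem.List.pySetD new_arr (row + 1) (PySem.List.pySetD (PySem.List.pyGetD new_arr (row + 1) []) col 0)
      (new_arr, col, row + 1)
    else
      (new_arr, col, row)

-- ===== PORT B =====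
-- The module-level delta table MOVE_DELTAS
def pvMoveDeltas : PySem.Dict String (Int × Int) :=
  PySem.Dict.ofList [("RIGHT", (0, 1)), ("LEFT", (0, -1)), ("UP", (-1, 0)), ("DOWN", (1, 0))]

-- _with_set: out = list(lst); out[i] = v; return out  (total form; in range under Pre_)
def pvWithSet (lst : List Int) (i : Int) (v : Int) : List Int := PySem.List.pySetD lst i v
def pvWithSetRow (lst : List (List Int)) (i : Int) (v : List Int) : List (List Int) := PySem.List.pySetD lst i v

-- _with_cell board r c v = _with_set(board, r, _with_set(board[r], c, v))
def pvWithCell (board : List (List Int)) (r c : Int) (v : Int) : List (List Int) :=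
  pvWithSetRow board r (pvWithSet (PySem.List.pyGetD board r []) c v)

def apply_action_to_state_alt (prev_state : List (List Int)) (action : Option String) (col : Int) (row : Int) : List (List Int) × Int × Int :=
  match action with
  | none => (prev_state, col, row)
  | some a =>
    match PySem.Dict.get? pvMoveDeltas a with
    | none => (prev_state.map (fun r => r), col, row)   -- [list(r) for r in prev_state]
    | some (dr, dc) =>
      let nr := row + dr
      let nc := col + dc
      let moved := PySem.List.pyGetD (PySem.List.pyGetD prev_state nr []) nc 0
      let board := pvWithCell prev_state row col moved
      let board := pvWithCell board nr nc 0
      (board, nc, nr)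

-- ===== PRECONDITION & SPEC =====
-- Boolean in-range checks for one move with delta (dr, dc): exactly the indexings A performs.
def pvOk (prev_state : List (List Int)) (row dr col dc : Int) : Bool :=
  decide (PySem.Raise.InRange prev_state.length row) &&
  decide (PySem.Raise.InRange prev_state.length (row + dr)) &&
  decide (PySem.Raise.InRange (PySem.List.pyGetD prev_state row []).length col) &&
  decide (PySem.Raise.InRange (PySem.List.pyGetD prev_state (row + dr) []).length (col + dc))

-- Pre_ excludes exactly the inputs on which Python A raises IndexError: a recognised move
-- whose source or destination cell is out of range (Python negative-index wraparound stays inside Pre_).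
def Pre_apply_action_to_state (prev_state : List (List Int)) (action : Option String) (col : Int) (row : Int) : Prop :=
  (action = some "RIGHT" → pvOk prev_state row 0 col 1 = true) ∧
  (action = some "LEFT" → pvOk prev_state row 0 col (-1) = true) ∧
  (action = some "UP" → pvOk prev_state row (-1) col 0 = true) ∧
  (action = some "DOWN" → pvOk prev_state row 1 col 0 = true)
instance (prev_state : List (List Int)) (action : Option String) (col : Int) (row : Int) : Decidable (Pre_apply_action_to_state prev_state action col row) := by unfold Pre_apply_action_to_state; infer_instance

def pvWitness_apply_action_to_state : List (List Int) × Option String × Int × Int := ([[1, 2], [3, 0]], some "LEFT", 1, 1)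

def Spec_apply_action_to_state (prev_state : List (List Int)) (action : Option String) (col : Int) (row : Int) (out : List (List Int) × Int × Int) : Prop := out = apply_action_to_state_alt prev_state action col row
instance (prev_state : List (List Int)) (action : Option String) (col : Int) (row : Int) (out : List (List Int) × Int × Int) : Decidable (Spec_apply_action_to_state prev_state action col row out) := by unfold Spec_apply_action_to_state; infer_instance

-- ===== CLAIM (what is proved, stated in full; the proofs are below) =====
def Claim_equal_apply_action_to_state : Prop := ∀ (prev_state : List (List Int)) (action : Option String) (col : Int) (row : Int), Dom_apply_action_to_state prev_state action col row → Pre_apply_action_to_state prev_state action col row → Spec_apply_action_to_state prev_state action col row (apply_action_to_state prev_state action col row)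

-- ===== LEMMAS AND PROOFS =====

-- ===== VERDICT (by name: the statement is the Claim_ definition above) =====
theorem apply_action_to_state_spec : Claim_equal_apply_action_to_state := by
  intro prev_state action col row _ _
  unfold Spec_apply_action_to_state
  cases action with
  | none => rfl
  | some a =>
    by_cases hR : a = "RIGHT"
    · subst hR
      have h : PySem.Dict.get? pvMoveDeltas "RIGHT" = some ((0 : Int), (1 : Int)) := by decide
      simp [apply_action_to_state, apply_action_to_state_alt, pvWithCell, pvWithSet, pvWithSetRow, h]
    · by_cases hL : a = "LEFT"
      · subst hL
        have h : PySem.Dict.get? pvMoveDeltas "LEFT" = some ((0 : Int), (-1 : Int)) := by decide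
        simp [apply_action_to_state, apply_action_to_state_alt, pvWithCell, pvWithSet, pvWithSetRow, h,
          show ∀ x : Int, x + -1 = x - 1 from fun x => by ring]
      · by_cases hU : a = "UP"
        · subst hU
          have h : PySem.Dict.get? pvMoveDeltas "UP" = some ((-1 : Int), (0 : Int)) := by decide
          simp [apply_action_to_state, apply_action_to_state_alt, pvWithCell, pvWithSet, pvWithSetRow, h,
            show ∀ x : Int, x + -1 = x - 1 from fun x => by ring]
        · by_cases hD : a = "DOWN"
          · subst hD
            have h : PySem.Dict.get? pvMoveDeltas "DOWN" = some ((1 : Int), (0 : Int)) := by decide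
            simp [apply_action_to_state, apply_action_to_state_alt, pvWithCell, pvWithSet, pvWithSetRow, h]
          · have h : PySem.Dict.get? pvMoveDeltas a = none := by
              simp [pvMoveDeltas, PySem.Dict.get?, PySem.Dict.ofList, PySem.Dict.update, PySem.Dict.insert,
                PySem.Dict.empty, PySem.Dict.contains, List.find?,
                beq_eq_false_iff_ne.mpr (Ne.symm hR), beq_eq_false_iff_ne.mpr (Ne.symm hL),
                beq_eq_false_iff_ne.mpr (Ne.symm hU), beq_eq_false_iff_ne.mpr (Ne.symm hD)]
            simp [apply_action_to_state, apply_action_to_state_alt, h, hR, hL, hU, hD]
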